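-- pv_equiv track=rewrite | github.com/lester381/Proyecto_correo | Proyecto/Proyecto/servidor/servidor_correo.py | camino_simple
-- ===== SOURCE A (Python) =====
-- RED = {
--     "s1": ["s2", "s4"],
--     "s2": ["s1", "s3"],
--     "s3": ["s2"],
--     "s4": ["s1"],
-- }
--
-- def camino_simple(origen, destino, visit=None):
--     #usando recursividad ve cual es el mejor camino entre los 4 servidores
--     if visit is None:
--         visit = set()
--     if origen == destino:
--         return [destino]
--     visit.add(origen)
--     for v in RED.get(origen, []):
--         if v not in visit:
--             c = camino_simple(v, destino, visit)
--             if c: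
--                 return [origen] + c
--     return None
-- ===== SOURCE B (Python) =====
-- RED = {
--     "s1": ["s2", "s4"],
--     "s2": ["s1", "s3"],
--     "s3": ["s2"],
--     "s4": ["s1"],
-- }
--
-- def camino_simple(origen, destino, visit=None):
--     # iterative explicit-stack DFS (same first-neighbour depth-first order, same visit mutation)
--     if origen == destino:
--         return [destino]
--     visit = set() if visit is None else visit
--     visit.add(origen)
--     stack = [(origen, iter(RED.get(origen, [])))]
--     path = [origen]
--     while stack:
--         node, it = stack[-1]
--         for v in it:
--             if v in visit:
--                 continue
--             if v == destino:
--                 return path + [destino]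
--             visit.add(v)
--             path.append(v)
--             stack.append((v, iter(RED.get(v, []))))
--             break
--         else:
--             stack.pop()
--             path.pop()
--     return None
-- ===== Notes on version B (the rewrite author's own statement) =====
-- stated objective: alternative
-- what changed: The recursive depth-first search is replaced by an iterative explicit-stack DFS machine that keeps (node, remaining-neighbours) frames and a path list, marking nodes in the same order so the returned path and the visit-set mutation are identical.
import Mathlib
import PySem

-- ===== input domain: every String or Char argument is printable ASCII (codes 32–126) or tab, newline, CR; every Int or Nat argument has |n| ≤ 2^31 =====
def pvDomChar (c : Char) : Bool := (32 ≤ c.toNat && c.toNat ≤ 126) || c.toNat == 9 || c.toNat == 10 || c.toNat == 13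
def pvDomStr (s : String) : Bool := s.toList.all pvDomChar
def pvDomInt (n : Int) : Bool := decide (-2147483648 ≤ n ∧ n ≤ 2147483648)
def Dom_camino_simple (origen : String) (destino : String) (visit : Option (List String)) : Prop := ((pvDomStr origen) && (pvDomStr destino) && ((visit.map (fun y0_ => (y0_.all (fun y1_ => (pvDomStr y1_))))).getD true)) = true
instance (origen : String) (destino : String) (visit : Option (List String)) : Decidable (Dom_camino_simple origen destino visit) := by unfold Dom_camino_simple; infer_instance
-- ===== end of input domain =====

-- One honest line: B replaces A's recursive DFS by an iterative explicit-stack DFS (same traversal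
-- order, same visit-set mutation); equivalence here is about the RETURN value (both Pythons mutate
-- the caller's visit set identically).

-- ===== PORT A =====
-- the module constant RED
def pvRED : PySem.Dict String (List String) :=
  PySem.Dict.ofList [("s1", ["s2", "s4"]), ("s2", ["s1", "s3"]), ("s3", ["s2"]), ("s4", ["s1"])]

-- A's recursion, state-passing (the Python mutates the shared `visit` set, so the set is threaded
-- through and returned); `fuel` is only a totality guard: 5 always suffices (the graph has 4 nodes,
-- each recursive call marks a previously unmarked node) and the fuel-0 branch is never reached.
mutual
def pvAGo (fuel : Nat) (origen destino : String) (visit : List String) :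
    Option (List String) × List String :=
  match fuel with
  | 0 => (none, visit)          -- unreachable totality guard
  | f + 1 =>
    if origen = destino then (some [destino], visit)
    else pvALoop f (pvRED.getD origen []) origen destino (PySem.Set.add visit origen)
termination_by (fuel, 0)

-- the `for v in RED.get(origen, [])` loop
def pvALoop (f : Nat) (ns : List String) (origen destino : String) (visit : List String) :
    Option (List String) × List String :=
  match ns with
  | [] => (none, visit)
  | v :: rest =>
    if v ∈ visit then pvALoop f rest origen destino visit
    else
      match pvAGo f v destino visit with
      | (some c, vis2) =>
        if c = [] then pvALoop f rest origen destino vis2   -- `if c:` falsy (never happens)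
        else (some (origen :: c), vis2)                      -- return [origen] + c
      | (none, vis2) => pvALoop f rest origen destino vis2
termination_by (f, ns.length + 1)
end

def camino_simple (origen : String) (destino : String) (visit : Option (List String)) :
    Option (List String) :=
  (pvAGo 5 origen destino (visit.getD [])).1

-- ===== PORT B =====
-- B's stack machine: frames are (node, remaining neighbours); `fuel` is only a totality guard,
-- consumed exactly at a push (each push marks a new node, so 4 always suffices).
def pvBRun (fuel : Nat) (stack : List (String × List String)) (path : List String)
    (destino : String) (visit : List String) : Option (List String) :=
  match fuel, stack with
  | 0, _ => none                -- unreachable totality guard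
  | _ + 1, [] => none
  | f + 1, (_, []) :: rest => pvBRun (f + 1) rest path.dropLast destino visit
  | f + 1, (node, v :: ns) :: rest =>
    if v ∈ visit then pvBRun (f + 1) ((node, ns) :: rest) path destino visit
    else if v = destino then some (path ++ [destino])
    else pvBRun f ((v, pvRED.getD v []) :: (node, ns) :: rest) (path ++ [v]) destino
           (PySem.Set.add visit v)
termination_by (fuel, (stack.map (fun fr => fr.2.length + 1)).sum)

def camino_simple_alt (origen : String) (destino : String) (visit : Option (List String)) :
    Option (List String) :=
  let vis := visit.getD []
  if origen = destino then some [destino]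
  else pvBRun 4 [(origen, pvRED.getD origen [])] [origen] destino (PySem.Set.add vis origen)

-- ===== PRECONDITION & SPEC =====
def Spec_camino_simple (origen : String) (destino : String) (visit : Option (List String)) (out : Option (List String)) : Prop := out = camino_simple_alt origen destino visit
instance (origen : String) (destino : String) (visit : Option (List String)) (out : Option (List String)) : Decidable (Spec_camino_simple origen destino visit out) := by unfold Spec_camino_simple; infer_instance

-- ===== CLAIM (what is proved, stated in full; the proofs are below) =====
def Claim_equal_camino_simple : Prop := ∀ (origen : String) (destino : String) (visit : Option (List String)), Dom_camino_simple origen destino visit → Spec_camino_simple origen destino visit (camino_simple origen destino visit)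

-- ===== LEMMAS AND PROOFS =====

-- the node universe: every key and every neighbour of RED
def pvU : List String := ["s1", "s2", "s3", "s4"]

-- number of universe nodes not yet marked
def pvMu (visit : List String) : Nat := pvU.countP (fun x => decide (x ∉ visit))

theorem pvRED_getD (v : String) :
    pvRED.getD v [] =
      if v = "s1" then ["s2", "s4"] else if v = "s2" then ["s1", "s3"]
      else if v = "s3" then ["s2"] else if v = "s4" then ["s1"] else [] := by
  have hred : pvRED = PySem.Dict.mk
      [("s1", ["s2", "s4"]), ("s2", ["s1", "s3"]), ("s3", ["s2"]), ("s4", ["s1"])] := by rfl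
  rw [hred, PySem.Dict.getD_eq_get?_getD]
  simp only [PySem.Dict.get?_mk_cons, beq_iff_eq]
  by_cases h1 : v = "s1"
  · subst h1; simp
  rw [if_neg (fun h => h1 h.symm)]
  by_cases h2 : v = "s2"
  · subst h2; simp
  rw [if_neg (fun h => h2 h.symm)]
  by_cases h3 : v = "s3"
  · subst h3; simp
  rw [if_neg (fun h => h3 h.symm)]
  by_cases h4 : v = "s4"
  · subst h4; simp
  rw [if_neg (fun h => h4 h.symm)]
  simp [h1, h2, h3, h4]
  show (PySem.Dict.empty.get? v).getD [] = []
  simp [PySem.Dict.get?_empty]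

theorem pvMu_mono {vis vis2 : List String} (h : ∀ x ∈ vis, x ∈ vis2) :
    pvMu vis2 ≤ pvMu vis := by
  apply List.countP_mono_left
  intro a _ ha
  simp_all
  intro hm; exact ha (h a hm)
theorem pvRED_getD_sub (v : String) : ∀ x ∈ pvRED.getD v [], x ∈ pvU := by
  rw [pvRED_getD]
  split_ifs <;> simp [pvU]

theorem pvRED_getD_notU {v : String} (h : v ∉ pvU) : pvRED.getD v [] = [] := by
  rw [pvRED_getD]
  simp [pvU] at h
  simp [h.1, h.2.1, h.2.2.1, h.2.2.2]

theorem pvCountP_sub {l vis : List String} {v : String} (hl : l.Nodup) (hv : v ∈ l)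
    (hnv : v ∉ vis) :
    l.countP (fun x => decide (x ∉ vis ++ [v])) + 1 = l.countP (fun x => decide (x ∉ vis)) := by
  induction l with
  | nil => simp at hv
  | cons a l ih =>
    by_cases hav : a = v
    · subst hav
      have hnl : a ∉ l := (List.nodup_cons.mp hl).1
      have ht : l.countP (fun x => decide (x ∉ vis ++ [a])) =
          l.countP (fun x => decide (x ∉ vis)) := by
        apply List.countP_congr
        intro x hx
        have hxa : x ≠ a := fun h => hnl (h ▸ hx)
        simp [List.mem_append, hxa]
      rw [List.countP_cons, List.countP_cons, ht]
      simp [List.mem_append, hnv]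
    · have hvl : v ∈ l := by
        rcases List.mem_cons.mp hv with h | h
        · exact absurd h.symm hav
        · exact h
      have ha := ih (List.nodup_cons.mp hl).2 hvl
      rw [List.countP_cons, List.countP_cons]
      have heq : (decide (a ∉ vis ++ [v])) = (decide (a ∉ vis)) := by
        simp [List.mem_append, hav]
      rw [heq]
      omega

theorem pvMu_add {v : String} {vis : List String} (hU : v ∈ pvU) (hnv : v ∉ vis) :
    pvMu (PySem.Set.add vis v) + 1 = pvMu vis := by
  rw [pvMu, pvMu, PySem.Set.add_of_not_mem hnv]
  exact pvCountP_sub (by decide) hU hnv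

theorem pvMu_add_le {v : String} (vis : List String) (hU : v ∈ pvU) :
    pvMu (PySem.Set.add vis v) ≤ 3 := by
  have hlt : ∀ vis2 : List String, v ∈ vis2 → pvMu vis2 ≤ 3 := by
    intro vis2 hv2
    fin_cases hU <;>
      simp [pvMu, pvU, List.countP_cons, hv2] <;> split_ifs <;> simp
  by_cases hnv : v ∈ vis
  · rw [PySem.Set.add_of_mem hnv]; exact hlt vis hnv
  · exact hlt _ (by simp [PySem.Set.mem_add])

theorem pvALoop_mono_aux (f : Nat)
    (hgo : ∀ o d vis, ∀ x ∈ vis, x ∈ (pvAGo f o d vis).2) :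
    ∀ ns o d vis, ∀ x ∈ vis, x ∈ (pvALoop f ns o d vis).2 := by
  intro ns
  induction ns with
  | nil => intro o d vis x hx; simpa [pvALoop] using hx
  | cons v rest ih =>
    intro o d vis x hx
    rw [pvALoop]
    by_cases hv : v ∈ vis
    · simpa [hv] using ih o d vis x hx
    · simp only [hv, if_false]
      rcases hE : pvAGo f v d vis with ⟨c, vis2⟩
      have hx2 : x ∈ vis2 := by
        have := hgo v d vis x hx
        rw [hE] at this; exact this
      cases c with
      | none => simpa [hE] using ih o d vis2 x hx2
      | some cl =>
        by_cases hcl : cl = []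
        · subst hcl; simpa [hE] using ih o d vis2 x hx2
        · simp [hcl]; exact hx2

theorem pvAGo_mono : ∀ f o d vis, ∀ x ∈ vis, x ∈ (pvAGo f o d vis).2 := by
  intro f
  induction f with
  | zero => intro o d vis x hx; simpa [pvAGo] using hx
  | succ f ih =>
    intro o d vis x hx
    rw [pvAGo]
    by_cases hod : o = d
    · simpa [hod] using hx
    · simp only [hod, if_false]
      exact pvALoop_mono_aux f ih _ o d _ x (by simp [PySem.Set.mem_add]; exact Or.inl hx)

theorem pvALoop_mono (f : Nat) (ns : List String) (o d : String) (vis : List String) :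
    ∀ x ∈ vis, x ∈ (pvALoop f ns o d vis).2 :=
  pvALoop_mono_aux f (pvAGo_mono f) ns o d vis

theorem pvALoop_ne_nil : ∀ (f : Nat) (ns : List String) (o d : String) (vis : List String),
    (pvALoop f ns o d vis).1 ≠ some [] := by
  intro f ns
  induction ns with
  | nil => intro o d vis; simp [pvALoop]
  | cons v rest ih =>
    intro o d vis
    rw [pvALoop]
    by_cases hv : v ∈ vis
    · simpa [hv] using ih o d vis
    · simp only [hv, if_false]
      rcases hE : pvAGo f v d vis with ⟨c, vis2⟩
      cases c with
      | none => simpa using ih o d vis2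
      | some cl =>
        by_cases hcl : cl = []
        · subst hcl; simpa using ih o d vis2
        · simp [hcl]

theorem pvAFI : ∀ f g ns o d vis, (∀ x ∈ ns, x ∈ pvU) → pvMu vis + 1 ≤ f →
    pvMu vis + 1 ≤ g → pvALoop f ns o d vis = pvALoop g ns o d vis := by
  intro f
  induction f using Nat.strong_induction_on with
  | _ f IHf =>
    intro g ns
    induction ns with
    | nil => intro o d vis _ _ _; simp [pvALoop]
    | cons v rest ih =>
      intro o d vis hns hf hg
      have hrest : ∀ x ∈ rest, x ∈ pvU := fun x hx => hns x (List.mem_cons_of_mem v hx)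
      have hvU : v ∈ pvU := hns v List.mem_cons_self
      obtain ⟨f', rfl⟩ : ∃ f', f = f' + 1 := ⟨f - 1, by omega⟩
      obtain ⟨g', rfl⟩ : ∃ g', g = g' + 1 := ⟨g - 1, by omega⟩
      rw [pvALoop, pvALoop]
      by_cases hv : v ∈ vis
      · simp only [hv, if_true]
        exact ih o d vis hrest hf hg
      · simp only [hv, if_false]
        have hgo : pvAGo (f' + 1) v d vis = pvAGo (g' + 1) v d vis := by
          rw [pvAGo, pvAGo]
          by_cases hvd : v = d
          · simp [hvd]
          · simp only [hvd, if_false]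
            have hmu := pvMu_add hvU hv
            exact IHf f' (by omega) g' (pvRED.getD v [] ) v d (PySem.Set.add vis v)
              (pvRED_getD_sub v) (by omega) (by omega)
        rw [← hgo]
        rcases hE : pvAGo (f' + 1) v d vis with ⟨c, vis2⟩
        have hsub : ∀ x ∈ vis, x ∈ vis2 := by
          intro x hx
          have := pvAGo_mono (f' + 1) v d vis x hx
          rw [hE] at this; exact this
        have hmu2 : pvMu vis2 ≤ pvMu vis := pvMu_mono hsub
        cases c with
        | none => exact ih o d vis2 hrest (by omega) (by omega)
        | some cl =>
          by_cases hcl : cl = []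
          · subst hcl; simpa using ih o d vis2 hrest (by omega) (by omega)
          · simp [hcl]

theorem pvML : ∀ f ns vis o rest path d, (∀ x ∈ ns, x ∈ pvU) → pvMu vis + 1 ≤ f →
    pvBRun f ((o, ns) :: rest) (path ++ [o]) d vis =
      match pvALoop f ns o d vis with
      | (some r, _) => some (path ++ r)
      | (none, vis2) => pvBRun (f - (pvMu vis - pvMu vis2)) rest path d vis2 := by
  intro f
  induction f using Nat.strong_induction_on with
  | _ f IHf =>
    intro ns
    induction ns with
    | nil =>
      intro vis o rest path d _ hf
      obtain ⟨f', rfl⟩ : ∃ f', f = f' + 1 := ⟨f - 1, by omega⟩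
      rw [pvBRun, pvALoop]
      simp
    | cons v rest' ih =>
      intro vis o rest path d hns hf
      have hrest' : ∀ x ∈ rest', x ∈ pvU := fun x hx => hns x (List.mem_cons_of_mem v hx)
      have hvU : v ∈ pvU := hns v List.mem_cons_self
      obtain ⟨f', rfl⟩ : ∃ f', f = f' + 1 := ⟨f - 1, by omega⟩
      rw [pvBRun, pvALoop]
      by_cases hv : v ∈ vis
      · simp only [hv, if_true]
        exact ih vis o rest path d hrest' hf
      · simp only [hv, if_false]
        by_cases hvd : v = d
        · -- found the destination
          rw [pvAGo]
          simp [hvd, List.append_assoc]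
        · simp only [hvd, if_false]
          have hmu := pvMu_add hvU hv
          -- unfold the recursive call
          have hgo : pvAGo (f' + 1) v d vis =
              pvALoop f' (pvRED.getD v []) v d (PySem.Set.add vis v) := by
            rw [pvAGo]; simp [hvd]
          -- B pushes the frame for v; apply the outer IH to the new top frame
          have hB := IHf f' (by omega) (pvRED.getD v []) (PySem.Set.add vis v) v
            ((o, rest') :: rest) (path ++ [o]) d (pvRED_getD_sub v) (by omega)
          rw [hB, hgo]
          rcases hE : pvALoop f' (pvRED.getD v []) v d (PySem.Set.add vis v) with ⟨c, vis2⟩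
          have hsub : ∀ x ∈ PySem.Set.add vis v, x ∈ vis2 := by
            intro x hx
            have := pvALoop_mono f' (pvRED.getD v []) v d (PySem.Set.add vis v) x hx
            rw [hE] at this; exact this
          have hmu2 : pvMu vis2 ≤ pvMu (PySem.Set.add vis v) := pvMu_mono hsub
          cases c with
          | some cl =>
            have hcl : cl ≠ [] := by
              have := pvALoop_ne_nil f' (pvRED.getD v []) v d (PySem.Set.add vis v)
              rw [hE] at this; simpa using this
            simp [hcl, List.append_assoc]
          | none =>
            -- the subtree failed: B continues on (o, rest') with leftover fuel
            have hgle : f' - (pvMu (PySem.Set.add vis v) - pvMu vis2) < f' + 1 := by omega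
            dsimp only
            have hB2 := IHf (f' - (pvMu (PySem.Set.add vis v) - pvMu vis2)) hgle rest' vis2 o
              rest path d hrest' (by omega)
            rw [hB2]
            have hA := pvAFI (f' - (pvMu (PySem.Set.add vis v) - pvMu vis2)) (f' + 1) rest' o d
              vis2 hrest' (by omega) (by omega)
            rw [hA]
            rcases hE2 : pvALoop (f' + 1) rest' o d vis2 with ⟨c2, vis3⟩
            have hsub2 : ∀ x ∈ vis2, x ∈ vis3 := by
              intro x hx
              have := pvALoop_mono (f' + 1) rest' o d vis2 x hx
              rw [hE2] at this; exact this
            have hmu3 : pvMu vis3 ≤ pvMu vis2 := pvMu_mono hsub2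
            cases c2 with
            | some cl2 => rfl
            | none =>
              dsimp only
              congr 1
              omega

theorem pvBRun_nil {g : Nat} (hg : 1 ≤ g) (path : List String) (d : String)
    (vis : List String) : pvBRun g [] path d vis = none := by
  obtain ⟨g', rfl⟩ : ∃ g', g = g' + 1 := ⟨g - 1, by omega⟩
  rw [pvBRun]

-- ===== VERDICT (by name: the statement is the Claim_ definition above) =====
theorem camino_simple_spec : Claim_equal_camino_simple := by
  intro o d visit _
  show camino_simple o d visit = camino_simple_alt o d visit
  rw [camino_simple, camino_simple_alt, pvAGo]
  by_cases hod : o = d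
  · simp [hod]
  · simp only [hod, if_false]
    set vis0 := visit.getD [] with hvis0
    set vis1 := PySem.Set.add vis0 o with hvis1
    by_cases hoU : o ∈ pvU
    · have hmu1 : pvMu vis1 ≤ 3 := pvMu_add_le vis0 hoU
      have hml := pvML 4 (pvRED.getD o []) vis1 o [] [] d (pvRED_getD_sub o) (by omega)
      simp only [List.nil_append] at hml
      rw [hml]
      rcases hE : pvALoop 4 (pvRED.getD o []) o d vis1 with ⟨c, vis2⟩
      have hsub : ∀ x ∈ vis1, x ∈ vis2 := by
        intro x hx
        have := pvALoop_mono 4 (pvRED.getD o []) o d vis1 x hx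
        rw [hE] at this; exact this
      have hmu2 : pvMu vis2 ≤ pvMu vis1 := pvMu_mono hsub
      cases c with
      | some cl => simp
      | none =>
        dsimp only
        rw [pvBRun_nil (by omega)]
    · rw [pvRED_getD_notU hoU]
      rw [pvALoop, pvBRun, pvBRun]
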